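-- pv_equiv track=rewrite | github.com/dsiddharth2/codehawk | src/agents/openai_runner.py | _brace_balanced_extract
-- ===== SOURCE A (Python) =====
-- def _brace_balanced_extract(text: str, keyword: str) -> list[str]:
--     """Return all brace-balanced substrings of text that start with '{' and contain keyword."""
--     results = []
--     n = len(text)
--     i = 0
--     while i < n:
--         if text[i] == "{":
--             depth = 0
--             j = i
--             while j < n:
--                 if text[j] == "{":
--                     depth += 1
--                 elif text[j] == "}":
--                     depth -= 1
--                     if depth == 0:
--                         candidate = text[i : j + 1]
--                         if keyword in candidate:
--                             results.append(candidate)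
--                         i = j + 1
--                         break
--                 j += 1
--             else:
--                 i += 1
--         else:
--             i += 1
--     return results
-- ===== SOURCE B (Python) =====
-- def _brace_balanced_extract(text: str, keyword: str) -> list[str]:
--     """Return all brace-balanced substrings of text that start with '{' and contain keyword."""
--     # Pass 1: one stack pass computing, for every '{' that has a
--     # balancing '}', the index of that '}'.
--     match = {}
--     stack = []
--     k = 0
--     for c in text:
--         if c == "{":
--             stack.append(k)
--         elif c == "}":
--             if stack:
--                 match[stack.pop()] = k
--         k += 1
--     # Pass 2: emit, jumping over each emitted balanced segment.
--     results = []
--     n = len(text)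
--     i = 0
--     while i < n:
--         j = match.get(i)
--         if j is None:
--             i += 1
--         else:
--             candidate = text[i : j + 1]
--             if keyword in candidate:
--                 results.append(candidate)
--             i = j + 1
--     return results
-- ===== Notes on version B (the rewrite author's own statement) =====
-- stated objective: alternative
-- what changed: A rescans from every '{' with a fresh depth-counting inner loop to find its balancing '}'; B instead makes one stack pass over the text that records the balancing '}' of every '{' in a dict, then an emit loop that only looks up each position in that dict.
import Mathlib
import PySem

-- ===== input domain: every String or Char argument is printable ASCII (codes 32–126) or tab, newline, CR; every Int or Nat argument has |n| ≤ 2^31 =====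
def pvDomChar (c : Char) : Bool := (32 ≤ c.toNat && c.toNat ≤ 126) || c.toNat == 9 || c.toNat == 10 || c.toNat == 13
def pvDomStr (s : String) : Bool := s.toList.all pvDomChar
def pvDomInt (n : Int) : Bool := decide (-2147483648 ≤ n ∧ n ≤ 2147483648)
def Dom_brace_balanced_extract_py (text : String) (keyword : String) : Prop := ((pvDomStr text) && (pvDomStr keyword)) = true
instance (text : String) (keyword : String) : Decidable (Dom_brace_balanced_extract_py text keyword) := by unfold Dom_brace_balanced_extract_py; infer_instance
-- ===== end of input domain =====

-- B precomputes the balancing '}' of every '{' in one stack pass into a dict, then an emit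
-- loop that looks positions up in that dict, instead of A's fresh depth-counting rescan from each '{'.

-- ===== PORT A =====
-- A's inner 'while j < n' loop: returns the break position j (where depth returns to 0),
-- or none when the loop exhausts (Python's while-else).  The candidate slice/append that
-- Python performs just before the break is done by the caller pvOuterAF on the returned j.
-- fuel only makes the recursion structural: it is called with fuel = cs.length - j, which
-- decreases by exactly 1 per iteration, so fuel = 0 exactly when j ≥ cs.length (= while-else).
def pvInnerAF : Nat → List Char → Nat → Int → Option Nat
  | 0, _, _, _ => none
  | fuel + 1, cs, j, depth =>
    if h : j < cs.length then
      if cs[j] = '{' then pvInnerAF fuel cs (j+1) (depth+1)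
      else if cs[j] = '}' then
        (if depth - 1 = 0 then some j else pvInnerAF fuel cs (j+1) (depth-1))
      else pvInnerAF fuel cs (j+1) depth
    else none

def pvInnerA (cs : List Char) (j : Nat) (depth : Int) : Option Nat :=
  pvInnerAF (cs.length - j) cs j depth

-- A's outer 'while i < n' loop; same exact-fuel scheme (i advances by ≥ 1 per iteration,
-- so fuel = cs.length - i never runs out before i ≥ cs.length)
def pvOuterAF : Nat → List Char → List Char → Nat → List String → List String
  | 0, _, _, _, acc => acc
  | fuel + 1, cs, kw, i, acc =>
    if h : i < cs.length then
      if cs[i] = '{' then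
        match pvInnerA cs i 0 with
        | some j =>
          let candidate := PySem.List.slice cs (some (i : Int)) (some ((j : Int) + 1))
          pvOuterAF fuel cs kw (j+1)
            (if PySem.Chars.isIn kw candidate then acc ++ [String.ofList candidate] else acc)
        | none => pvOuterAF fuel cs kw (i+1) acc
      else pvOuterAF fuel cs kw (i+1) acc
    else acc

def brace_balanced_extract_py (text : String) (keyword : String) : List String :=
  pvOuterAF text.toList.length text.toList keyword.toList 0 []

-- ===== PORT B =====
-- one step of B's first pass (state: running index k, stack of open positions, match dict)
def pvStep (s : Nat × List Nat × PySem.Dict Nat Nat) (c : Char) :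
    Nat × List Nat × PySem.Dict Nat Nat :=
  if c = '{' then (s.1 + 1, s.1 :: s.2.1, s.2.2)
  else if c = '}' then
    match s.2.1 with
    | [] => (s.1 + 1, [], s.2.2)
    | p :: rest => (s.1 + 1, rest, s.2.2.insert p s.1)
  else (s.1 + 1, s.2.1, s.2.2)

def pvBuild (cs : List Char) : Nat × List Nat × PySem.Dict Nat Nat :=
  cs.foldl pvStep (0, [], PySem.Dict.empty)

-- B's emit loop; fuel only makes the recursion structural (i strictly increases each
-- iteration, so fuel = cs.length never runs out before i ≥ cs.length)
def pvEmitB (cs kw : List Char) (d : PySem.Dict Nat Nat) (fuel i : Nat) (acc : List String) :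
    List String :=
  match fuel with
  | 0 => acc
  | fuel + 1 =>
    if i < cs.length then
      match d.get? i with
      | none => pvEmitB cs kw d fuel (i+1) acc
      | some j =>
        let candidate := PySem.List.slice cs (some (i : Int)) (some ((j : Int) + 1))
        pvEmitB cs kw d fuel (j+1)
          (if PySem.Chars.isIn kw candidate then acc ++ [String.ofList candidate] else acc)
    else acc

def brace_balanced_extract_py_alt (text : String) (keyword : String) : List String :=
  pvEmitB text.toList keyword.toList (pvBuild text.toList).2.2 text.toList.length 0 []

-- ===== PRECONDITION & SPEC =====
def Spec_brace_balanced_extract_py (text : String) (keyword : String) (out : List String) : Prop := out = brace_balanced_extract_py_alt text keyword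
instance (text : String) (keyword : String) (out : List String) : Decidable (Spec_brace_balanced_extract_py text keyword out) := by unfold Spec_brace_balanced_extract_py; infer_instance

-- ===== CLAIM (what is proved, stated in full; the proofs are below) =====
def Claim_equal_brace_balanced_extract_py : Prop := ∀ (text : String) (keyword : String), Dom_brace_balanced_extract_py text keyword → Spec_brace_balanced_extract_py text keyword (brace_balanced_extract_py text keyword)

-- ===== LEMMAS AND PROOFS =====

-- one-step unfoldings of A's inner scan at position k
theorem pvInnerA_open (cs : List Char) (k : Nat) (hk : k < cs.length) (h : cs[k] = '{')
    (d : Int) : pvInnerA cs k d = pvInnerA cs (k+1) (d+1) := by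
  have e : cs.length - k = (cs.length - (k+1)) + 1 := by omega
  rw [pvInnerA, pvInnerA, e, pvInnerAF]
  simp [dif_pos hk, h]

theorem pvInnerA_close (cs : List Char) (k : Nat) (hk : k < cs.length) (h : cs[k] = '}')
    (d : Int) : pvInnerA cs k d = if d - 1 = 0 then some k else pvInnerA cs (k+1) (d-1) := by
  have e : cs.length - k = (cs.length - (k+1)) + 1 := by omega
  rw [pvInnerA, pvInnerA, e, pvInnerAF]
  simp [dif_pos hk, h]

theorem pvInnerA_other (cs : List Char) (k : Nat) (hk : k < cs.length)
    (h1 : ¬ cs[k] = '{') (h2 : ¬ cs[k] = '}') (d : Int) :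
    pvInnerA cs k d = pvInnerA cs (k+1) d := by
  have e : cs.length - k = (cs.length - (k+1)) + 1 := by omega
  rw [pvInnerA, pvInnerA, e, pvInnerAF]
  simp [dif_pos hk, h1, h2]

theorem pvInnerA_stop (cs : List Char) (j : Nat) (d : Int) (hj : cs.length ≤ j) :
    pvInnerA cs j d = none := by
  have e : cs.length - j = 0 := by omega
  rw [pvInnerA, e, pvInnerAF]

-- Invariant of B's first pass after processing the prefix cs[:k] (state (k, st, d)):
-- st is the strictly decreasing stack of still-open '{' positions, the local scan of each
-- continues as a scan from k at its stack depth, and d holds exactly the completed matches.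
def pvINV (cs : List Char) (k : Nat) (st : List Nat) (d : PySem.Dict Nat Nat) : Prop :=
  List.Pairwise (· > ·) st ∧
  (∀ t (ht : t < st.length),
      st[t] < k ∧ cs[st[t]]? = some '{' ∧
      pvInnerA cs st[t] 0 = pvInnerA cs k ((t : Int) + 1)) ∧
  (∀ p r, d.get? p = some r ↔
      (p < k ∧ cs[p]? = some '{' ∧ p ∉ st ∧ pvInnerA cs p 0 = some r))

theorem pvINV_step (cs : List Char) (k : Nat) (st : List Nat) (d : PySem.Dict Nat Nat)
    (c : Char) (hc : cs[k]? = some c) (hI : pvINV cs k st d) :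
    pvINV cs (k+1) (pvStep (k, st, d) c).2.1 (pvStep (k, st, d) c).2.2 := by
  obtain ⟨hk, hck⟩ := List.getElem?_eq_some_iff.mp hc
  obtain ⟨hpw, hst, hd⟩ := hI
  have hmem : ∀ x ∈ st, x < k := by
    intro x hx
    obtain ⟨t, ht, rfl⟩ := List.mem_iff_getElem.mp hx
    exact (hst t ht).1
  by_cases h1 : c = '{'
  · subst h1
    simp only [pvStep, if_true]
    refine ⟨List.pairwise_cons.mpr ⟨fun x hx => hmem x hx, hpw⟩, ?_, ?_⟩
    · intro t ht
      cases t with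
      | zero =>
        simp only [List.getElem_cons_zero]
        refine ⟨by omega, hc, ?_⟩
        rw [pvInnerA_open cs k hk hck 0]; norm_num
      | succ t =>
        have ht' : t < st.length := by simpa using ht
        obtain ⟨hlt, hch, hin⟩ := hst t ht'
        simp only [List.getElem_cons_succ]
        refine ⟨by omega, hch, ?_⟩
        rw [hin, pvInnerA_open cs k hk hck ((t : Int) + 1)]
        push_cast; ring_nf
    · intro p r
      rw [hd p r]
      constructor
      · rintro ⟨hpk, hpc, hpst, hpi⟩
        refine ⟨by omega, hpc, ?_, hpi⟩
        simp only [List.mem_cons, not_or]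
        exact ⟨by omega, hpst⟩
      · rintro ⟨hpk, hpc, hpst, hpi⟩
        simp only [List.mem_cons, not_or] at hpst
        exact ⟨by omega, hpc, hpst.2, hpi⟩
  · by_cases h2 : c = '}'
    · subst h2
      have hck' : ¬ cs[k] = '{' := by rw [hck]; decide
      cases st with
      | nil =>
        simp only [pvStep, if_neg h1, if_true]
        refine ⟨List.Pairwise.nil, by intro t ht; simp at ht, ?_⟩
        intro p r
        rw [hd p r]
        constructor
        · rintro ⟨hpk, hpc, hpst, hpi⟩
          exact ⟨by omega, hpc, hpst, hpi⟩
        · rintro ⟨hpk, hpc, hpst, hpi⟩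
          refine ⟨?_, hpc, hpst, hpi⟩
          rcases Nat.lt_succ_iff_lt_or_eq.mp hpk with h | h
          · exact h
          · exfalso; subst h
            obtain ⟨_, e⟩ := List.getElem?_eq_some_iff.mp hpc
            exact hck' e
      | cons q rest =>
        simp only [pvStep, if_neg h1, if_true]
        have hq := hst 0 (by simp)
        simp only [List.getElem_cons_zero] at hq
        obtain ⟨hqk, hqc, hqi⟩ := hq
        have hqmatch : pvInnerA cs q 0 = some k := by
          rw [hqi]; norm_num [pvInnerA_close cs k hk hck]
        have hqrest : q ∉ rest := by
          have := (List.pairwise_cons.mp hpw).1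
          intro hmem'
          exact absurd rfl (Nat.ne_of_gt (this q hmem'))
        refine ⟨(List.pairwise_cons.mp hpw).2, ?_, ?_⟩
        · intro t ht
          have ht' : t + 1 < (q :: rest).length := by simpa using Nat.succ_lt_succ ht
          obtain ⟨hlt, hch, hin⟩ := hst (t+1) ht'
          simp only [List.getElem_cons_succ] at hlt hch hin
          refine ⟨by omega, hch, ?_⟩
          rw [hin]; push_cast
          rw [pvInnerA_close cs k hk hck ((t : Int) + 1 + 1)]
          have h5 : ¬ ((t : Int) + 1 + 1 - 1 = 0) := by omega
          rw [if_neg h5]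
          congr 1; omega
        · intro p r
          by_cases hpq : p = q
          · subst hpq
            rw [PySem.Dict.get?_insert_self]
            simp only [Option.some.injEq]
            constructor
            · rintro rfl
              exact ⟨by omega, hqc, hqrest, hqmatch⟩
            · rintro ⟨_, _, _, hpi⟩
              rw [hqmatch] at hpi
              exact Option.some.inj hpi
          · rw [PySem.Dict.get?_insert_of_ne d k hpq, hd p r]
            constructor
            · rintro ⟨hpk, hpc, hpst, hpi⟩
              simp only [List.mem_cons, not_or] at hpst
              exact ⟨by omega, hpc, hpst.2, hpi⟩
            · rintro ⟨hpk, hpc, hpst, hpi⟩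
              refine ⟨?_, hpc, ?_, hpi⟩
              · rcases Nat.lt_succ_iff_lt_or_eq.mp hpk with h | h
                · exact h
                · exfalso; subst h
                  obtain ⟨_, e⟩ := List.getElem?_eq_some_iff.mp hpc
                  exact hck' e
              · simp only [List.mem_cons, not_or]
                exact ⟨hpq, hpst⟩
    · simp only [pvStep, if_neg h1, if_neg h2]
      have hco : ¬ cs[k] = '{' := by rw [hck]; exact h1
      have hcc : ¬ cs[k] = '}' := by rw [hck]; exact h2
      refine ⟨hpw, ?_, ?_⟩
      · intro t ht
        obtain ⟨hlt, hch, hin⟩ := hst t ht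
        refine ⟨by omega, hch, ?_⟩
        rw [hin, pvInnerA_other cs k hk hco hcc ((t : Int) + 1)]
      · intro p r
        rw [hd p r]
        constructor
        · rintro ⟨hpk, hpc, hpst, hpi⟩
          exact ⟨by omega, hpc, hpst, hpi⟩
        · rintro ⟨hpk, hpc, hpst, hpi⟩
          refine ⟨?_, hpc, hpst, hpi⟩
          rcases Nat.lt_succ_iff_lt_or_eq.mp hpk with h | h
          · exact h
          · exfalso; subst h
            obtain ⟨_, e⟩ := List.getElem?_eq_some_iff.mp hpc
            exact hco e

theorem pvStep_fst (s : Nat × List Nat × PySem.Dict Nat Nat) (c : Char) :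
    (pvStep s c).1 = s.1 + 1 := by
  unfold pvStep
  split_ifs with h1 h2 <;> first
    | rfl
    | (cases h : s.2.1 <;> rfl)

theorem pvFold_inv (cs : List Char) :
    ∀ (l : List Char) (k : Nat) (st : List Nat) (d : PySem.Dict Nat Nat),
      cs.drop k = l → pvINV cs k st d →
      (l.foldl pvStep (k, st, d)).1 = k + l.length ∧
        pvINV cs (l.foldl pvStep (k, st, d)).1 (l.foldl pvStep (k, st, d)).2.1
          (l.foldl pvStep (k, st, d)).2.2 := by
  intro l
  induction l with
  | nil => intro k st d _ hI; exact ⟨by simp, hI⟩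
  | cons c l ih =>
    intro k st d hdrop hI
    have hck : cs[k]? = some c := by
      have h0 : (cs.drop k)[0]? = some c := by rw [hdrop]; rfl
      rw [List.getElem?_drop] at h0
      simpa using h0
    have hstep := pvINV_step cs k st d c hck hI
    have hfst : (pvStep (k, st, d) c).1 = k + 1 := pvStep_fst _ _
    have heta : pvStep (k, st, d) c =
        (k + 1, (pvStep (k, st, d) c).2.1, (pvStep (k, st, d) c).2.2) := by
      rw [← hfst]
    have hdrop' : cs.drop (k+1) = l := by
      have h9 : cs.drop (k+1) = (cs.drop k).drop 1 := by rw [List.drop_drop]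
      rw [h9, hdrop]; rfl
    have hrec := ih (k+1) (pvStep (k, st, d) c).2.1 (pvStep (k, st, d) c).2.2 hdrop' hstep
    rw [List.foldl_cons, heta]
    exact ⟨by rw [hrec.1]; simp [Nat.add_comm, Nat.add_left_comm], hrec.2⟩

theorem pvBuild_inv (cs : List Char) :
    (pvBuild cs).1 = cs.length ∧ pvINV cs (pvBuild cs).1 (pvBuild cs).2.1 (pvBuild cs).2.2 := by
  have hbase : pvINV cs 0 [] PySem.Dict.empty := by
    refine ⟨List.Pairwise.nil, by intro t ht; simp at ht, ?_⟩
    intro p r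
    simp [PySem.Dict.get?_empty]
  have h := pvFold_inv cs cs 0 [] PySem.Dict.empty (by simp) hbase
  simpa [pvBuild] using h

theorem pvBuild_get (cs : List Char) (i : Nat) :
    (pvBuild cs).2.2.get? i =
      if h : i < cs.length then (if cs[i] = '{' then pvInnerA cs i 0 else none) else none := by
  obtain ⟨hn, hI⟩ := pvBuild_inv cs
  rw [hn] at hI
  obtain ⟨hpw, hst, hd⟩ := hI
  by_cases h : i < cs.length
  · by_cases hb : cs[i] = '{'
    · rw [dif_pos h, if_pos hb]
      by_cases hmem : i ∈ (pvBuild cs).2.1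
      · obtain ⟨t, ht, hti⟩ := List.mem_iff_getElem.mp hmem
        have hnone : pvInnerA cs i 0 = none := by
          rw [← hti, (hst t ht).2.2]
          exact pvInnerA_stop cs cs.length _ le_rfl
        rw [hnone]
        cases hg : (pvBuild cs).2.2.get? i with
        | none => rfl
        | some r => exact absurd hmem ((hd i r).mp hg).2.2.1
      · cases hr : pvInnerA cs i 0 with
        | none =>
          cases hg : (pvBuild cs).2.2.get? i with
          | none => rfl
          | some r =>
            have := ((hd i r).mp hg).2.2.2
            rw [hr] at this; exact absurd this (by simp)
        | some r =>
          exact (hd i r).mpr ⟨h, List.getElem?_eq_some_iff.mpr ⟨h, hb⟩, hmem, hr⟩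
    · rw [dif_pos h, if_neg hb]
      cases hg : (pvBuild cs).2.2.get? i with
      | none => rfl
      | some r =>
        obtain ⟨h2, e⟩ := List.getElem?_eq_some_iff.mp ((hd i r).mp hg).2.1
        exact absurd e hb
  · rw [dif_neg h]
    cases hg : (pvBuild cs).2.2.get? i with
    | none => rfl
    | some r => exact absurd ((hd i r).mp hg).1 h

theorem pvEmit_eq (cs kw : List Char) :
    ∀ (fuel i : Nat) (acc : List String),
      pvEmitB cs kw (pvBuild cs).2.2 fuel i acc = pvOuterAF fuel cs kw i acc := by
  intro fuel
  induction fuel with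
  | zero => intro i acc; rfl
  | succ fuel ih =>
    intro i acc
    by_cases h : i < cs.length
    · have hg := pvBuild_get cs i
      rw [dif_pos h] at hg
      by_cases hb : cs[i] = '{'
      · rw [if_pos hb] at hg
        cases hr : pvInnerA cs i 0 with
        | none =>
          rw [hr] at hg
          rw [pvEmitB, if_pos h, hg, pvOuterAF]
          simp only [dif_pos h, if_pos hb, hr]
          exact ih (i+1) acc
        | some j =>
          rw [hr] at hg
          rw [pvEmitB, if_pos h, hg, pvOuterAF]
          simp only [dif_pos h, if_pos hb, hr]
          exact ih (j+1) _
      · rw [if_neg hb] at hg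
        rw [pvEmitB, if_pos h, hg, pvOuterAF]
        simp only [dif_pos h, if_neg hb]
        exact ih (i+1) acc
    · rw [pvEmitB, if_neg h, pvOuterAF, dif_neg h]

-- ===== VERDICT (by name: the statement is the Claim_ definition above) =====
theorem brace_balanced_extract_py_spec : Claim_equal_brace_balanced_extract_py := by
  intro text keyword _
  unfold Spec_brace_balanced_extract_py brace_balanced_extract_py brace_balanced_extract_py_alt
  exact (pvEmit_eq text.toList keyword.toList text.toList.length 0 []).symm
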